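-- pv_equiv track=rewrite | github.com/riddhindoshi/TDD_Python | email.py | get_clean_local_names
-- ===== SOURCE A (Python) =====
-- def get_clean_local_names(local_name):
--     index_of_plus = 0
--     index_of_at = 0
--     setFlag = False
--
--     for i in local_name:
--         if i == '+':
--             setFlag = True
--
--     if setFlag:
--         for i in range(0, len(local_name)):
--             if local_name[i] == '+':
--                 index_of_plus = i
--                 break
--         for i in range(0, len(local_name)):
--             if local_name[i] == '@':
--                 index_of_at = i
--                 break
--         a = ''
--         for i in range(0, len(local_name)):
--             if i not in range(index_of_plus, index_of_at):
--                 a += local_name[i]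
--         return a
--     else:
--         return local_name
-- ===== SOURCE B (Python) =====
-- def get_clean_local_names(local_name):
--     if '+' not in local_name:
--         return local_name
--     plus = local_name.index('+')
--     at = local_name.index('@') if '@' in local_name else 0
--     if at > plus:
--         return local_name[:plus] + local_name[at:]
--     return local_name
-- ===== Notes on version B (the rewrite author's own statement) =====
-- stated objective: simpler
-- what changed: Replace the flag scan, two break-loops and the per-index membership-filter rebuild of the string with two first-index lookups and a single slice concatenation local_name[:plus] + local_name[at:].
import Mathlib
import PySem

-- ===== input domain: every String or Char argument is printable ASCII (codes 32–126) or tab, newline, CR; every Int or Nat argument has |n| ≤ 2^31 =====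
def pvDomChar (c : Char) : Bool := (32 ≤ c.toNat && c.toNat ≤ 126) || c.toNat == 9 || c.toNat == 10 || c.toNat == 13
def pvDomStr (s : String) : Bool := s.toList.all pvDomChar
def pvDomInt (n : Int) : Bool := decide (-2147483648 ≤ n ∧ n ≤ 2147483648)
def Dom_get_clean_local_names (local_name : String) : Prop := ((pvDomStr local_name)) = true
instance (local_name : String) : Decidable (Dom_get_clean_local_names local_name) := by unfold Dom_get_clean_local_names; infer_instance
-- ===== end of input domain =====

-- B replaces A's flag scan and per-index membership-filter string rebuild with two boundary
-- indices and a single slice concatenation; objective: simpler (same asymptotics not claimed).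

-- ===== PORT A =====
-- the 'for i in range(0, len(..)): if ..[i] == c: idx = i; break' loop, idx initialised to 0:
-- the break is modelled by the state freezing at 'some i'; l.getD i ' ' is exact for the
-- in-bounds indices range(len) produces.
def pvBreakIdx (l : List Char) (c : Char) : Nat :=
  ((List.range l.length).foldl
    (fun st i =>
      match st with
      | some j => some j
      | none => if l.getD i ' ' = c then some i else none)
    none).getD 0

def get_clean_local_names (local_name : String) : String :=
  let l := local_name.toList
  let setFlag := l.foldl (fun f i => if i = '+' then true else f) false
  if setFlag then
    let index_of_plus := pvBreakIdx l '+'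
    let index_of_at := pvBreakIdx l '@'
    -- 'i not in range(index_of_plus, index_of_at)' is exactly ¬ (index_of_plus ≤ i ∧ i < index_of_at)
    let a := (List.range l.length).foldl
      (fun a i => if ¬ (index_of_plus ≤ i ∧ i < index_of_at) then a ++ [l.getD i ' '] else a) []
    String.ofList a
  else
    local_name

-- ===== PORT B =====
-- '+' not in local_name / '@' in local_name: substring tests with a one-char needle, exactly
-- char membership; local_name.index(c) with c present is the first index of that char.
def get_clean_local_names_alt (local_name : String) : String :=
  let l := local_name.toList
  if '+' ∉ l then local_name
  else
    let plus := (PySem.List.index? l '+').getD 0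
    let at_ := if '@' ∈ l then (PySem.List.index? l '@').getD 0 else 0
    if plus < at_ then
      String.ofList (PySem.List.slice l none (some (plus : Int)) ++
                     PySem.List.slice l (some (at_ : Int)) none)
    else
      local_name

-- ===== PRECONDITION & SPEC =====
def Spec_get_clean_local_names (local_name : String) (out : String) : Prop := out = get_clean_local_names_alt local_name
instance (local_name : String) (out : String) : Decidable (Spec_get_clean_local_names local_name out) := by unfold Spec_get_clean_local_names; infer_instance

-- ===== CLAIM (what is proved, stated in full; the proofs are below) =====
def Claim_equal_get_clean_local_names : Prop := ∀ (local_name : String), Dom_get_clean_local_names local_name → Spec_get_clean_local_names local_name (get_clean_local_names local_name)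

-- ===== LEMMAS AND PROOFS =====

-- A's flag loop is membership of '+'
theorem pv_flag_eq (l : List Char) (b : Bool) :
    l.foldl (fun f i => if i = '+' then true else f) b = (b || decide ('+' ∈ l)) := by
  induction l generalizing b with
  | nil => simp
  | cons x xs ih =>
    simp only [List.foldl_cons]
    by_cases hx : x = '+'
    · rw [if_pos hx, ih]; simp [hx]
    · rw [if_neg hx, ih]; simp [List.mem_cons, Ne.symm hx]

-- once the break state is frozen, the fold is constant
theorem pv_break_frozen (p : Nat → Bool) (xs : List Nat) (j : Nat) :
    xs.foldl
      (fun st i =>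
        match st with
        | some j => some j
        | none => if p i then some i else none)
      (some j) = some j := by
  induction xs with
  | nil => rfl
  | cons x xs ih => simpa [List.foldl] using ih

-- the break loop computes find?
theorem pv_break_find (p : Nat → Bool) (xs : List Nat) :
    xs.foldl
      (fun st i =>
        match st with
        | some j => some j
        | none => if p i then some i else none)
      none = xs.find? p := by
  induction xs with
  | nil => rfl
  | cons x xs ih =>
    by_cases hx : p x
    · simp [List.foldl, List.find?, hx, pv_break_frozen]
    · simp [List.foldl, List.find?, hx, ih]

-- A's first-index loop is the first index of c (0 when c is absent)
theorem pvBreakIdx_eq (l : List Char) (c : Char) :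
    pvBreakIdx l c = (List.idxOf? c l).getD 0 := by
  unfold pvBreakIdx
  have hfun :
      (fun (st : Option Nat) (i : Nat) =>
        match st with
        | some j => some j
        | none => if l.getD i ' ' = c then some i else none)
      = (fun st i =>
        match st with
        | some j => some j
        | none => if (l.getD i ' ' == c) then some i else none) := by
    funext st i
    cases st <;> simp
  rw [hfun, pv_break_find]
  congr 1
  cases h : List.idxOf? c l with
  | none =>
    have hc : c ∉ l := List.idxOf?_eq_none_iff.mp h
    rw [List.find?_eq_none]
    intro i hi
    simp only [List.mem_range] at hi
    simp only [List.getD_eq_getElem?_getD, List.getElem?_eq_getElem hi, Option.getD_some]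
    intro hq
    exact hc ((eq_of_beq hq) ▸ List.getElem_mem hi)

  | some k =>
    obtain ⟨hk, hkc, hlt⟩ := List.idxOf?_eq_some_iff.mp h
    rw [List.find?_eq_some_iff_getElem]
    refine ⟨?_, k, by simpa using hk, by simp, ?_⟩
    · simp [List.getD_eq_getElem?_getD, List.getElem?_eq_getElem hk, hkc]
    · intro j hj
      have hjl : j < l.length := lt_trans (by simpa using hj) hk
      simp only [List.getElem_range] at *
      simp [List.getD_eq_getElem?_getD, List.getElem?_eq_getElem hjl]
      exact hlt j (by simpa using hj)

theorem pv_map_getD_range (l : List Char) :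
    (List.range l.length).map (fun i => l.getD i ' ') = l := by
  apply List.ext_getElem
  · simp
  · intro i h1 h2
    simp [List.getD_eq_getElem?_getD, List.getElem?_eq_getElem h2]

theorem pv_map_getD_take (l : List Char) (p : Nat) (hp : p ≤ l.length) :
    (List.range p).map (fun i => l.getD i ' ') = l.take p := by
  apply List.ext_getElem
  · simp [hp]
  · intro i h1 h2
    have : i < l.length := by simp at h1; omega
    simp [List.getD_eq_getElem?_getD, List.getElem?_eq_getElem this]

theorem pv_map_getD_drop (l : List Char) (q : Nat) (hq : q ≤ l.length) :
    (List.range (l.length - q)).map (fun i => l.getD (q + i) ' ') = l.drop q := by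
  apply List.ext_getElem
  · simp
  · intro i h1 h2
    simp only [List.getElem_map, List.getElem_range, List.getElem_drop,
      List.getD_eq_getElem?_getD]
    rw [List.getElem?_eq_getElem (by simp at h1; omega)]
    simp

-- rewrite A's rebuild loop to filter/map form
theorem pv_build_filter (l : List Char) (p q : Nat) :
    (List.range l.length).foldl
      (fun a i => if ¬ (p ≤ i ∧ i < q) then a ++ [l.getD i ' '] else a) []
    = ((List.range l.length).filter
        (fun i => !(decide (p ≤ i) && decide (i < q)))).map (fun i => l.getD i ' ') := by
  have hfun :
      (fun (a : List Char) (i : Nat) => if ¬ (p ≤ i ∧ i < q) then a ++ [l.getD i ' '] else a)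
      = (fun a i =>
          if (!(decide (p ≤ i) && decide (i < q))) = true then a ++ [l.getD i ' '] else a) := by
    funext a i
    by_cases h : p ≤ i ∧ i < q <;> simp [h]
  rw [hfun, PySem.List.foldl_append_if]
  simp

-- empty removal window: the loop rebuilds the whole string
theorem pv_build_all (l : List Char) (p q : Nat) (hqp : q ≤ p) :
    (List.range l.length).foldl
      (fun a i => if ¬ (p ≤ i ∧ i < q) then a ++ [l.getD i ' '] else a) [] = l := by
  rw [pv_build_filter]
  have : (List.range l.length).filter (fun i => !(decide (p ≤ i) && decide (i < q)))
      = List.range l.length := by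
    apply List.filter_eq_self.mpr
    intro i _
    have h : i < p ∨ q ≤ i := by omega
    simpa using h
  rw [this, pv_map_getD_range]

-- proper window p < q ≤ len: the loop rebuilds take p ++ drop q
theorem pv_build_cut (l : List Char) (p q : Nat) (hpq : p < q) (hq : q ≤ l.length) :
    (List.range l.length).foldl
      (fun a i => if ¬ (p ≤ i ∧ i < q) then a ++ [l.getD i ' '] else a) []
    = l.take p ++ l.drop q := by
  rw [pv_build_filter]
  have hA : List.range q = List.range p ++ (List.range (q - p)).map (fun x => p + x) := by
    conv_lhs => rw [show q = p + (q - p) by omega]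
    exact List.range_add
  have hB : List.range l.length
      = List.range q ++ (List.range (l.length - q)).map (fun x => q + x) := by
    conv_lhs => rw [show l.length = q + (l.length - q) by omega]
    exact List.range_add
  rw [hB, hA, List.filter_append, List.filter_append]
  have h1 : (List.range p).filter (fun i => !(decide (p ≤ i) && decide (i < q)))
      = List.range p := by
    apply List.filter_eq_self.mpr
    intro i hi
    simp only [List.mem_range] at hi
    have h : i < p ∨ q ≤ i := by omega
    simpa using h
  have h2 : ((List.range (q - p)).map (fun x => p + x)).filter
      (fun i => !(decide (p ≤ i) && decide (i < q))) = [] := by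
    rw [List.filter_map]
    have hnil : (List.range (q - p)).filter
        ((fun i => !(decide (p ≤ i) && decide (i < q))) ∘ fun x => p + x) = [] := by
      apply List.filter_eq_nil_iff.mpr
      intro j hj
      simp only [List.mem_range] at hj
      have h : p ≤ p + j ∧ p + j < q := by omega
      simpa using h
    rw [hnil, List.map_nil]
  have h3 : ((List.range (l.length - q)).map (fun x => q + x)).filter
      (fun i => !(decide (p ≤ i) && decide (i < q)))
      = (List.range (l.length - q)).map (fun x => q + x) := by
    apply List.filter_eq_self.mpr
    intro i hi
    simp only [List.mem_map, List.mem_range] at hi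
    obtain ⟨j, hj, rfl⟩ := hi
    simp
  rw [h1, h2, h3, List.append_nil, List.map_append, List.map_map]
  rw [pv_map_getD_take l p (le_trans (le_of_lt hpq) hq)]
  congr 1
  exact pv_map_getD_drop l q hq

-- ===== VERDICT (by name: the statement is the Claim_ definition above) =====
theorem get_clean_local_names_spec : Claim_equal_get_clean_local_names := by
  intro s _
  unfold Spec_get_clean_local_names get_clean_local_names get_clean_local_names_alt
  simp only [pv_flag_eq, Bool.false_or, pvBreakIdx_eq, PySem.List.index?_eq_idxOf?,
    PySem.List.slice_to_natCast, PySem.List.slice_from_natCast]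
  by_cases hplus : '+' ∈ s.toList
  · rw [if_pos (by simp [hplus]), if_neg (by simp [hplus])]
    set p := (List.idxOf? '+' s.toList).getD 0 with hp
    by_cases hat : '@' ∈ s.toList
    · rw [if_pos hat]
      set q := (List.idxOf? '@' s.toList).getD 0 with hq
      obtain ⟨k, hk⟩ := Option.isSome_iff_exists.mp (List.isSome_idxOf?.mpr hat)
      have hqk : q = k := by rw [hq, hk]; rfl
      obtain ⟨hklen, -, -⟩ := List.idxOf?_eq_some_iff.mp hk
      by_cases hcmp : p < q
      · rw [if_pos hcmp, pv_build_cut s.toList p q hcmp (by omega)]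
      · rw [if_neg hcmp, pv_build_all s.toList p q (by omega), String.ofList_toList]
    · rw [if_neg hat]
      have hq0 : (List.idxOf? '@' s.toList).getD 0 = 0 := by
        rw [List.idxOf?_eq_none_iff.mpr hat]; rfl
      rw [hq0, if_neg (by omega), pv_build_all s.toList p 0 (by omega), String.ofList_toList]
  · rw [if_neg (by simp [hplus]), if_pos hplus]
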